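-- pv_equiv track=rewrite | github.com/dcparry/pythonProject | Heatmap_project_Dianne_Parry.py | no_microchip_suburbs
-- ===== SOURCE A (Python) =====
-- def no_microchip_suburbs(dogs):
--     """ Takes dictionary of alive dogs and returns new dictionary of suburb as
--         key and number of dogs not microchipped in that suburb as the value.
--         :param dogs: dictionary of alive dogs and their attributes.
--         :return: dictionary of suburb and count as key/value pair.
--     """
--     no_microchip_suburbs_dict = {}
--     for suburb, desexed, classification, microchip in dogs.values():
--         if suburb not in no_microchip_suburbs_dict:
--             no_microchip_suburbs_dict[suburb] = 0
--         if microchip != "Y":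
--             no_microchip_suburbs_dict[suburb] += 1
--     no_microchipped_dict = dict(sorted(no_microchip_suburbs_dict.items()))
--     return no_microchipped_dict
-- ===== SOURCE B (Python) =====
-- def no_microchip_suburbs(dogs):
--     """ Same contract as A: suburb -> number of non-microchipped dogs, sorted by suburb.
--         Sort-then-scan: sort the records by suburb, then count each adjacent run. """
--     ordered = sorted(dogs.values(), key=lambda v: v[0])
--     items = []
--     current = None
--     count = 0
--     for suburb, _desexed, _classification, microchip in ordered:
--         if suburb != current:
--             if current is not None:
--                 items.append((current, count))
--             current = suburb
--             count = 0
--         if microchip != "Y":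
--             count += 1
--     if current is not None:
--         items.append((current, count))
--     return dict(items)
-- ===== Notes on version B (the rewrite author's own statement) =====
-- stated objective: alternative
-- what changed: A groups by suburb with a mutable dict accumulator (zero-init + conditional increment per record) and sorts the item pairs at the end; B instead sorts the records by suburb first and then makes one linear scan that counts each adjacent run, emitting (suburb, count) when the run ends - no dictionary lookup or membership test during counting.
import Mathlib
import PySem

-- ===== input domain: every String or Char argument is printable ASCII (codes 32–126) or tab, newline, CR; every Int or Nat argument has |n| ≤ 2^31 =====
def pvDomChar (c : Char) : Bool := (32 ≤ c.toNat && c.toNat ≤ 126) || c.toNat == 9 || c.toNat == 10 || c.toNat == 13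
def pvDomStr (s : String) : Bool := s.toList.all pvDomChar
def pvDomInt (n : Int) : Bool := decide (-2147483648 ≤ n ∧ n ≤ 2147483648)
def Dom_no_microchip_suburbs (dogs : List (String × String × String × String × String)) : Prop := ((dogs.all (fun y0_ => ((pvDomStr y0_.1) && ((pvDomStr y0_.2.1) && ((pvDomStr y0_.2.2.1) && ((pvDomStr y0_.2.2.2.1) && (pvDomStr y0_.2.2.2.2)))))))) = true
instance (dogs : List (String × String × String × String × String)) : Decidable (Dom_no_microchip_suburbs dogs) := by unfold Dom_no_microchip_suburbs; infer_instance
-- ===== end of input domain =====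

-- B replaces A's dict-accumulator grouping (zero-init + conditional increment, then sort the
-- items) by sort-the-records-first and one linear scan counting adjacent runs: an alternative
-- algorithm of the same cost. Equivalence of the RETURN value is what is proved.

-- ===== PORT A =====
-- the body of A's for-loop over dogs.values(): ensure the key, then conditionally increment
def aStep (d : PySem.Dict String Int) (v : String × String × String × String) : PySem.Dict String Int :=
  let d := if d.contains v.1 = true then d else d.insert v.1 0
  if v.2.2.2 ≠ "Y" then d.insert v.1 (d.getD v.1 0 + 1) else d

def no_microchip_suburbs (dogs : List (String × String × String × String × String)) : List (String × Int) :=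
  let d := (dogs.map (fun kv => kv.2)).foldl aStep PySem.Dict.empty
  -- dict(sorted(d.items())): tuples compare lexicographically
  PySem.List.sorted2 d.items (fun p => p.1) (fun p => p.2) false

-- ===== PORT B =====
-- the trailing "if current is not None: items.append((current, count))" of Source B
def bFlush (st : Option String × Int × List (String × Int)) : List (String × Int) :=
  match st.1 with
  | none => st.2.2
  | some s => st.2.2 ++ [(s, st.2.1)]

-- the body of Source B's for-loop over the sorted records
def bStep (st : Option String × Int × List (String × Int)) (v : String × String × String × String) :
    Option String × Int × List (String × Int) :=
  let st' := if some v.1 ≠ st.1 then (some v.1, (0 : Int), bFlush st) else st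
  if v.2.2.2 ≠ "Y" then (st'.1, st'.2.1 + 1, st'.2.2) else st'

def no_microchip_suburbs_alt (dogs : List (String × String × String × String × String)) : List (String × Int) :=
  let ordered := PySem.List.sorted (dogs.map (fun kv => kv.2)) (fun v => v.1) false
  bFlush (ordered.foldl bStep (none, 0, []))

-- ===== PRECONDITION & SPEC =====
def Spec_no_microchip_suburbs (dogs : List (String × String × String × String × String)) (out : List (String × Int)) : Prop := out = no_microchip_suburbs_alt dogs
instance (dogs : List (String × String × String × String × String)) (out : List (String × Int)) : Decidable (Spec_no_microchip_suburbs dogs out) := by unfold Spec_no_microchip_suburbs; infer_instance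

-- ===== CLAIM (what is proved, stated in full; the proofs are below) =====
def Claim_equal_no_microchip_suburbs : Prop := ∀ (dogs : List (String × String × String × String × String)), Dom_no_microchip_suburbs dogs → Spec_no_microchip_suburbs dogs (no_microchip_suburbs dogs)

-- ===== LEMMAS AND PROOFS =====

-- the number of non-microchipped records of suburb s in l
def cntS (l : List (String × String × String × String)) (s : String) : Int :=
  (((l.filter (fun v => v.2.2.2 ≠ "Y")).map (fun v => v.1)).count s : Int)

-- collapse adjacent duplicates (what B's run scan emits as keys)
def uniqAdj : List String → List String
  | [] => []
  | [x] => [x]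
  | x :: y :: rest => if x = y then uniqAdj (y :: rest) else x :: uniqAdj (y :: rest)

-- ---------- A-side: the accumulator dict characterised ----------

theorem keys_aStep (d : PySem.Dict String Int) (v : String × String × String × String) :
    (aStep d v).keys = PySem.Set.add d.keys v.1 := by
  unfold aStep PySem.Set.add
  by_cases hc : d.contains v.1 = true
  · have hk : v.1 ∈ d.keys := (PySem.Dict.contains_iff_mem_keys d v.1).mp hc
    by_cases hm : v.2.2.2 = "Y" <;>
      simp [hc, hm, PySem.Set.contains, hk, PySem.Dict.keys_insert_of_contains d _ hc]
  · have hc' : d.contains v.1 = false := by simpa using hc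
    have hk : v.1 ∉ d.keys := fun hmem => by
      simp [(PySem.Dict.contains_iff_mem_keys d v.1).mpr hmem] at hc'
    by_cases hm : v.2.2.2 = "Y" <;>
      simp [hc', hm, PySem.Set.contains, hk,
        PySem.Dict.keys_insert_of_contains _ _ (PySem.Dict.contains_insert_self d v.1 0),
        PySem.Dict.keys_insert_of_not_contains d _ hc']

theorem nodup_keys_aStep (d : PySem.Dict String Int) (v : String × String × String × String)
    (h : d.keys.Nodup) : (aStep d v).keys.Nodup := by
  unfold aStep
  split <;> split <;>
    first
      | exact h
      | exact PySem.Dict.nodup_keys_insert _ _ _ h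
      | exact PySem.Dict.nodup_keys_insert _ _ _ (PySem.Dict.nodup_keys_insert _ _ _ h)

theorem getD_aStep (d : PySem.Dict String Int) (v : String × String × String × String) (s : String) :
    (aStep d v).getD s 0 = d.getD s 0 + (if v.2.2.2 ≠ "Y" ∧ s = v.1 then 1 else 0) := by
  unfold aStep
  by_cases hc : d.contains v.1 = true
  · by_cases hm : v.2.2.2 = "Y" <;> by_cases hs : s = v.1 <;>
      simp [hc, hm, hs, PySem.Dict.getD_insert]
  · have hc' : d.contains v.1 = false := by simpa using hc
    have h0 : d.getD v.1 (0 : Int) = 0 := PySem.Dict.getD_of_not_contains d 0 hc'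
    by_cases hm : v.2.2.2 = "Y" <;> by_cases hs : s = v.1 <;>
      simp [hc', hm, hs, PySem.Dict.getD_insert, h0]

theorem keys_foldl_aStep (l : List (String × String × String × String)) (d : PySem.Dict String Int) :
    (l.foldl aStep d).keys = PySem.Set.update d.keys (l.map (fun v => v.1)) := by
  induction l generalizing d with
  | nil => rfl
  | cons v l ih =>
    simp only [List.foldl_cons, List.map_cons, PySem.Set.update, List.foldl_cons]
    rw [ih, keys_aStep]
    rfl

theorem nodup_keys_foldl_aStep (l : List (String × String × String × String))
    (d : PySem.Dict String Int) (h : d.keys.Nodup) : (l.foldl aStep d).keys.Nodup := by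
  induction l generalizing d with
  | nil => exact h
  | cons v l ih => exact ih _ (nodup_keys_aStep d v h)

theorem getD_foldl_aStep (l : List (String × String × String × String))
    (d : PySem.Dict String Int) (s : String) :
    (l.foldl aStep d).getD s 0 = d.getD s 0 + cntS l s := by
  induction l generalizing d with
  | nil => simp [cntS]
  | cons v l ih =>
    simp only [List.foldl_cons]
    rw [ih, getD_aStep]
    unfold cntS
    by_cases hm : v.2.2.2 ≠ "Y"
    · by_cases hs : s = v.1
      · simp [List.filter_cons, hm, hs]
        ring
      · have hs' : ¬ v.1 = s := fun h => hs h.symm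
        simp [List.filter_cons, hm, hs, hs']
    · simp [List.filter_cons, hm]

-- the strict precedence sorted2 uses for identity tuple keys (String, Int)
def pairLt (a b : String × Int) : Bool :=
  decide (a.1 < b.1) || (!decide (b.1 < a.1) && decide (a.2 < b.2))

theorem pairLt_asymm (a b : String × Int) (h : pairLt a b = true) : pairLt b a = false := by
  rw [Bool.eq_false_iff]
  intro h'
  unfold pairLt at h h'
  simp only [Bool.or_eq_true, Bool.and_eq_true, Bool.not_eq_true', decide_eq_true_eq,
    decide_eq_false_iff_not] at h h'
  rcases h with h1 | ⟨h1, h1'⟩ <;> rcases h' with h2 | ⟨h2, h2'⟩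
  · exact absurd h2 (lt_asymm h1)
  · exact h2 h1
  · exact h1 h2
  · exact absurd h2' (lt_asymm h1')

theorem pairLt_trans (a b c : String × Int) (hab : pairLt a b = true) (hbc : pairLt b c = true) :
    pairLt a c = true := by
  unfold pairLt at *
  simp only [Bool.or_eq_true, Bool.and_eq_true, Bool.not_eq_true', decide_eq_true_eq,
    decide_eq_false_iff_not] at *
  rcases hab with h1 | ⟨h1, h1'⟩ <;> rcases hbc with h2 | ⟨h2, h2'⟩
  · exact Or.inl (lt_trans h1 h2)
  · exact Or.inl (lt_of_lt_of_le h1 (not_lt.mp h2))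
  · exact Or.inl (lt_of_le_of_lt (not_lt.mp h1) h2)
  · exact Or.inr ⟨fun hca => absurd hca
      (not_lt.mpr (le_trans (not_lt.mp h1) (not_lt.mp h2))), lt_trans h1' h2'⟩

theorem pairwise_insertBy (x : String × Int) (ys : List (String × Int))
    (h : ys.Pairwise (fun a b => pairLt b a = false)) :
    (PySem.List.insertBy pairLt x ys).Pairwise (fun a b => pairLt b a = false) := by
  induction ys with
  | nil => simp [PySem.List.insertBy]
  | cons y ys ih =>
    rw [PySem.List.insertBy]
    rcases List.pairwise_cons.mp h with ⟨hy, hys⟩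
    by_cases hxy : pairLt x y = true
    · simp only [hxy, if_true]
      refine List.pairwise_cons.mpr ⟨?_, h⟩
      intro z hz
      rcases List.mem_cons.mp hz with rfl | hz'
      · exact pairLt_asymm _ _ hxy
      · by_cases hzx : pairLt z x = true
        · exact absurd (hy z hz') (by simp [pairLt_trans z x y hzx hxy])
        · simpa using hzx
    · have hxy' : pairLt x y = false := by simpa using hxy
      simp only [hxy]
      refine List.pairwise_cons.mpr ⟨?_, ih hys⟩
      intro z hz
      rcases (PySem.List.mem_insertBy pairLt x z ys).mp hz with rfl | hz'
      · exact hxy'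
      · exact hy z hz'

theorem pairwise_foldl_insertBy (xs : List (String × Int)) :
    ∀ (acc : List (String × Int)), acc.Pairwise (fun a b => pairLt b a = false) →
      (xs.foldl (fun acc x => PySem.List.insertBy pairLt x acc) acc).Pairwise
        (fun a b => pairLt b a = false) := by
  induction xs with
  | nil => intro acc h; exact h
  | cons x xs ih => intro acc h; exact ih _ (pairwise_insertBy x acc h)

theorem pairwise_sorted2 (xs : List (String × Int)) :
    (PySem.List.sorted2 xs (fun p => p.1) (fun p => p.2) false).Pairwise
      (fun a b => pairLt b a = false) := by
  have hdef : PySem.List.sorted2 xs (fun p => p.1) (fun p => p.2) false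
      = xs.foldl (fun acc x => PySem.List.insertBy pairLt x acc) [] := by
    unfold PySem.List.sorted2 pairLt
    rfl
  rw [hdef]
  exact pairwise_foldl_insertBy xs [] (by simp)

theorem fst_le_of_not_pairLt (a b : String × Int) (h : pairLt b a = false) : a.1 ≤ b.1 := by
  unfold pairLt at h
  simp only [Bool.or_eq_false_iff, decide_eq_false_iff_not] at h
  exact not_lt.mp h.1

theorem items_foldl_aStep (l : List (String × String × String × String)) :
    (l.foldl aStep PySem.Dict.empty).items
      = (PySem.Set.ofList (l.map (fun v => v.1))).map (fun s => (s, cntS l s)) := by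
  have hnd : (l.foldl aStep PySem.Dict.empty).keys.Nodup :=
    nodup_keys_foldl_aStep l _ PySem.Dict.nodup_keys_empty
  rw [PySem.Dict.items_eq_map_keys _ hnd 0, keys_foldl_aStep]
  have hkeys : PySem.Set.update (PySem.Dict.empty (κ := String) (ν := Int)).keys
      (l.map (fun v => v.1)) = PySem.Set.ofList (l.map (fun v => v.1)) := by
    rw [PySem.Set.ofList_eq_foldl]; rfl
  rw [hkeys]
  refine List.map_congr_left ?_
  intro s _
  rw [getD_foldl_aStep]
  simp

-- sorting a list of (key, g key) pairs with distinct keys by the tuple = sorting the keys, then attaching g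
theorem sorted2_map_section (S : List String) (g : String → Int) (hS : S.Nodup) :
    PySem.List.sorted2 (S.map (fun s => (s, g s))) (fun p => p.1) (fun p => p.2) false
      = (PySem.List.sorted S (fun s => s) false).map (fun s => (s, g s)) := by
  have hpermA := PySem.List.sorted2_perm (S.map (fun s => (s, g s)))
    (fun p : String × Int => p.1) (fun p : String × Int => p.2) false
  have hpermB : ((PySem.List.sorted S (fun s => s) false).map (fun s => (s, g s))).Perm
      (S.map (fun s => (s, g s))) := (PySem.List.sorted_perm S _ false).map _
  have hndA : ((PySem.List.sorted2 (S.map (fun s => (s, g s)))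
      (fun p => p.1) (fun p => p.2) false).map (fun p : String × Int => p.1)).Nodup := by
    refine ((hpermA.map (fun p : String × Int => p.1)).nodup_iff).mpr ?_
    simpa [Function.comp_def] using hS
  have hpwA : (PySem.List.sorted2 (S.map (fun s => (s, g s)))
      (fun p => p.1) (fun p => p.2) false).Pairwise (fun a b => a.1 < b.1) := by
    have hle := pairwise_sorted2 (S.map (fun s => (s, g s)))
    have hne : (PySem.List.sorted2 (S.map (fun s => (s, g s)))
        (fun p => p.1) (fun p => p.2) false).Pairwise (fun a b => a.1 ≠ b.1) :=
      List.pairwise_map.mp hndA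
    exact (hle.and hne).imp (fun h => lt_of_le_of_ne (fst_le_of_not_pairLt _ _ h.1) h.2)
  have hpwB : ((PySem.List.sorted S (fun s => s) false).map (fun s => (s, g s))).Pairwise
      (fun a b : String × Int => a.1 < b.1) := by
    refine List.pairwise_map.mpr ?_
    have hle := PySem.List.sorted_pairwise S (fun s => s)
    have hnd : (PySem.List.sorted S (fun s => s) false).Nodup :=
      ((PySem.List.sorted_perm S _ false).nodup_iff).mpr hS
    exact (hle.and hnd).imp (fun h => lt_of_le_of_ne h.1 h.2)
  exact List.Perm.eq_of_pairwise
    (fun a b _ _ h1 h2 => absurd h2 (lt_asymm h1))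
    hpwA hpwB (hpermA.trans hpermB.symm)

theorem a_normal_form (vals : List (String × String × String × String)) :
    PySem.List.sorted2 (vals.foldl aStep PySem.Dict.empty).items
        (fun p => p.1) (fun p => p.2) false
      = (PySem.List.sorted (PySem.Set.ofList (vals.map (fun v => v.1))) (fun s => s) false).map
          (fun s => (s, cntS vals s)) := by
  rw [items_foldl_aStep]
  exact sorted2_map_section _ _ (PySem.Set.nodup_ofList _)

-- ---------- B-side: the run scan characterised ----------

theorem mem_uniqAdj (x : String) : ∀ (l : List String), x ∈ uniqAdj l ↔ x ∈ l := by
  intro l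
  induction l using uniqAdj.induct with
  | case1 => simp [uniqAdj]
  | case2 x => simp [uniqAdj]
  | case3 b rest ih => simp [uniqAdj, ih]
  | case4 a b rest hab ih => simp [uniqAdj, hab, ih]

theorem pairwise_lt_uniqAdj : ∀ (l : List String), l.Pairwise (· ≤ ·) →
    (uniqAdj l).Pairwise (· < ·) := by
  intro l
  induction l using uniqAdj.induct with
  | case1 => intro _; simp [uniqAdj]
  | case2 x => intro _; simp [uniqAdj]
  | case3 b rest ih =>
    intro h
    simpa [uniqAdj] using ih (List.pairwise_cons.mp h).2
  | case4 a b rest hab ih =>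
    intro h
    rcases List.pairwise_cons.mp h with ⟨ha, htail⟩
    simp only [uniqAdj, if_neg hab]
    refine List.pairwise_cons.mpr ⟨?_, ih htail⟩
    intro z hz
    have hzmem : z ∈ b :: rest := (mem_uniqAdj z (b :: rest)).mp hz
    have haz : a ≤ z := ha z hzmem
    have hab' : a < b := lt_of_le_of_ne (ha b (List.mem_cons_self)) hab
    rcases List.mem_cons.mp hzmem with rfl | hzr
    · exact hab'
    · exact lt_of_lt_of_le hab' ((List.pairwise_cons.mp htail).1 z hzr)

theorem fold_run (l : List (String × String × String × String)) :
    ∀ (s : String) (c : Int) (items : List (String × Int)),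
      (s :: l.map (fun v => v.1)).Pairwise (· ≤ ·) →
      bFlush (l.foldl bStep (some s, c, items))
        = items ++ (uniqAdj (s :: l.map (fun v => v.1))).map
            (fun t => (t, (if t = s then c else 0) + cntS l t)) := by
  induction l with
  | nil => intro s c items _; simp [bFlush, uniqAdj, cntS]
  | cons v rest ih =>
    intro s c items h
    rcases List.pairwise_cons.mp h with ⟨hs, htail⟩
    by_cases hvs : v.1 = s
    · -- same run continues
      have hstep : bStep (some s, c, items) v
          = (some s, c + (if v.2.2.2 ≠ "Y" then 1 else 0), items) := by
        simp [bStep, hvs]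
        by_cases hm : v.2.2.2 = "Y" <;> simp [hm]
      have huniq : uniqAdj (s :: v.1 :: rest.map (fun v => v.1))
          = uniqAdj (s :: rest.map (fun v => v.1)) := by
        simp [uniqAdj, hvs]
      have htail' : (s :: rest.map (fun v => v.1)).Pairwise (· ≤ ·) := by
        refine List.pairwise_cons.mpr ⟨?_, (List.pairwise_cons.mp htail).2⟩
        intro z hz
        exact hs z (List.mem_cons_of_mem _ hz)
      simp only [List.foldl_cons, hstep, List.map_cons, huniq]
      rw [ih s (c + (if v.2.2.2 ≠ "Y" then 1 else 0)) items htail']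
      congr 1
      refine List.map_congr_left ?_
      intro t _
      unfold cntS
      by_cases hm : v.2.2.2 ≠ "Y"
      · by_cases hts : t = s
        · simp [List.filter_cons, hm, hts, hvs]
          ring
        · have : ¬ v.1 = t := fun hh => hts (hvs ▸ hh.symm ▸ rfl)
          simp [List.filter_cons, hm, hts, this]
      · simp [List.filter_cons, hm]
    · -- run boundary: flush (s, c), start run v.1
      have hne : (some v.1 : Option String) ≠ some s := by
        simpa using hvs
      have hstep : bStep (some s, c, items) v
          = (some v.1, (0 : Int) + (if v.2.2.2 ≠ "Y" then 1 else 0), items ++ [(s, c)]) := by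
        simp [bStep, bFlush, hne]
        by_cases hm : v.2.2.2 = "Y" <;> simp [hm]
      have hsv : s < v.1 := lt_of_le_of_ne (hs v.1 (by simp)) (fun hh => hvs hh.symm)
      have huniq : uniqAdj (s :: v.1 :: rest.map (fun v => v.1))
          = s :: uniqAdj (v.1 :: rest.map (fun v => v.1)) := by
        simp [uniqAdj, (ne_of_lt hsv)]
      simp only [List.foldl_cons, hstep, List.map_cons, huniq]
      rw [ih v.1 ((0 : Int) + (if v.2.2.2 ≠ "Y" then 1 else 0)) (items ++ [(s, c)]) htail]
      rw [List.append_assoc]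
      congr 1
      simp only [List.map_cons, List.singleton_append, List.cons.injEq]
      constructor
      · -- flushed pair: (s, c) and s never reappears
        have hcnt : cntS (v :: rest) s = 0 := by
          unfold cntS
          have hnot : s ∉ ((v :: rest).filter (fun v => v.2.2.2 ≠ "Y")).map (fun v => v.1) := by
            intro hmem
            rcases List.mem_map.mp hmem with ⟨w, hw, hws⟩
            have hwmem : w ∈ v :: rest := List.mem_of_mem_filter hw
            have : s ≤ w.1 := hs w.1 (by
              rcases List.mem_cons.mp hwmem with rfl | hwr
              · simp
              · exact List.mem_cons_of_mem _ (List.mem_map.mpr ⟨w, hwr, rfl⟩))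
            rcases List.mem_cons.mp hwmem with rfl | hwr
            · exact hvs hws
            · have hlt : v.1 ≤ w.1 := (List.pairwise_cons.mp htail).1 w.1
                (List.mem_map.mpr ⟨w, hwr, rfl⟩)
              exact absurd (hws ▸ hlt) (not_le.mpr hsv)
          have : s ∉ ((v :: rest).filter (fun v => !decide (v.2.2.2 = "Y"))).map (fun v => v.1) := by
            simpa using hnot
          simp [List.count_eq_zero.mpr this]
        simp [hcnt]
      · refine List.map_congr_left ?_
        intro t ht
        have htmem : t ∈ v.1 :: rest.map (fun v => v.1) := (mem_uniqAdj t _).mp ht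
        have hvt : v.1 ≤ t := by
          rcases List.mem_cons.mp htmem with rfl | htr
          · exact le_refl _
          · exact (List.pairwise_cons.mp htail).1 t htr
        have hts : ¬ t = s := fun hh => absurd (hh ▸ hvt) (not_le.mpr hsv)
        have hcnt : cntS (v :: rest) t
            = (if t = v.1 then (if v.2.2.2 ≠ "Y" then (1 : Int) else 0) else 0) + cntS rest t := by
          unfold cntS
          by_cases hm : v.2.2.2 ≠ "Y"
          · by_cases htv : t = v.1
            · simp [List.filter_cons, hm, htv]; ring
            · have : ¬ v.1 = t := fun hh => htv hh.symm
              simp [List.filter_cons, hm, htv, this]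
          · simp [List.filter_cons, hm]
        rcases eq_or_ne t v.1 with rfl | htv
        · by_cases hm : v.2.2.2 = "Y" <;> simp [hcnt, hm, hts]
        · simp [hcnt, hts, htv]

theorem b_scan (l : List (String × String × String × String))
    (h : (l.map (fun v => v.1)).Pairwise (· ≤ ·)) :
    bFlush (l.foldl bStep (none, 0, []))
      = (uniqAdj (l.map (fun v => v.1))).map (fun t => (t, cntS l t)) := by
  cases l with
  | nil => simp [bFlush, uniqAdj]
  | cons v rest =>
    have hstep : bStep (none, 0, []) v
        = (some v.1, (0 : Int) + (if v.2.2.2 ≠ "Y" then 1 else 0), []) := by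
      simp [bStep, bFlush]
      by_cases hm : v.2.2.2 = "Y" <;> simp [hm]
    have hpw : (v.1 :: rest.map (fun v => v.1)).Pairwise (· ≤ ·) := by simpa using h
    simp only [List.foldl_cons, hstep]
    rw [fold_run rest v.1 ((0 : Int) + (if v.2.2.2 ≠ "Y" then 1 else 0)) [] hpw]
    simp only [List.nil_append, List.map_cons]
    refine List.map_congr_left ?_
    intro t _
    have hcnt : cntS (v :: rest) t
        = (if t = v.1 then (if v.2.2.2 ≠ "Y" then (1 : Int) else 0) else 0) + cntS rest t := by
      unfold cntS
      by_cases hm : v.2.2.2 ≠ "Y"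
      · by_cases htv : t = v.1
        · simp [List.filter_cons, hm, htv]; ring
        · have : ¬ v.1 = t := fun hh => htv hh.symm
          simp [List.filter_cons, hm, htv, this]
      · simp [List.filter_cons, hm]
    rcases eq_or_ne t v.1 with rfl | htv
    · by_cases hm : v.2.2.2 = "Y" <;> simp [hcnt, hm]
    · simp [hcnt, htv]

theorem cntS_perm {l l' : List (String × String × String × String)} (hp : l.Perm l')
    (s : String) : cntS l s = cntS l' s := by
  unfold cntS
  rw [List.Perm.count_eq ((hp.filter _).map _)]

theorem b_normal_form (vals : List (String × String × String × String)) :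
    bFlush ((PySem.List.sorted vals (fun v => v.1) false).foldl bStep (none, 0, []))
      = (PySem.List.sorted (PySem.Set.ofList (vals.map (fun v => v.1))) (fun s => s) false).map
          (fun s => (s, cntS vals s)) := by
  set ordered := PySem.List.sorted vals (fun v => v.1) false with hord
  have hperm : ordered.Perm vals := PySem.List.sorted_perm vals _ false
  have hsorted : (ordered.map (fun v => v.1)).Pairwise (· ≤ ·) :=
    List.pairwise_map.mpr (PySem.List.sorted_pairwise vals (fun v => v.1))
  rw [b_scan ordered hsorted]
  have hkeys : PySem.List.sorted (PySem.Set.ofList (vals.map (fun v => v.1))) (fun s => s) false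
      = uniqAdj (ordered.map (fun v => v.1)) := by
    have hpwU : (uniqAdj (ordered.map (fun v => v.1))).Pairwise (· < ·) :=
      pairwise_lt_uniqAdj _ hsorted
    have hpermU : (uniqAdj (ordered.map (fun v => v.1))).Perm
        (PySem.Set.ofList (vals.map (fun v => v.1))) := by
      refine (List.perm_ext_iff_of_nodup hpwU.nodup (PySem.Set.nodup_ofList _)).mpr ?_
      intro a
      rw [mem_uniqAdj, PySem.Set.mem_ofList]
      exact (hperm.map (fun v => v.1)).mem_iff
    exact PySem.List.sorted_eq_of_perm_of_pairwise_lt _ _ _ hpermU hpwU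
  rw [hkeys]
  refine List.map_congr_left ?_
  intro t _
  rw [cntS_perm hperm]

-- ===== VERDICT (by name: the statement is the Claim_ definition above) =====
theorem no_microchip_suburbs_spec : Claim_equal_no_microchip_suburbs := by
  intro dogs _
  unfold Spec_no_microchip_suburbs no_microchip_suburbs
  show _ = no_microchip_suburbs_alt dogs
  unfold no_microchip_suburbs_alt
  rw [a_normal_form, b_normal_form]
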